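-- pv_equiv track=rewrite | github.com/mromanella/advent_of_code_2020 | day_6/answer.py | part_1
-- ===== SOURCE A (Python) =====
-- from typing import List, Set
--
-- def separate_groups(lines: List[str]) -> List[Set[str]]:
--     group = []
--     groups = []
--     for line in lines:
--         if line == '\n' or line == '':
--             groups.append(group)
--             group = []
--         else:
--             group.append(set(line))
--     groups.append(group)
--     return groups
--
-- def part_1(lines: List[str]) -> int:
--     groups = separate_groups(lines)
--     yes_counts = []
--     for group in groups:
--         yes = set()
--         for individual in group:
--             yes.update(*individual)
--         yes_counts.append(len(yes))
--     return sum(yes_counts)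
-- ===== SOURCE B (Python) =====
-- def part_1(lines):
--     total = 0
--     cur = set()
--     for line in lines:
--         if line == '\n' or line == '':
--             total += len(cur)
--             cur = set()
--         else:
--             cur.update(line)
--     return total + len(cur)
-- ===== Notes on version B (the rewrite author's own statement) =====
-- stated objective: simpler
-- what changed: Single streaming pass keeping only a running character set and an integer total, instead of building a list of per-line group-sets and then iterating over the groups again.
import Mathlib
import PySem

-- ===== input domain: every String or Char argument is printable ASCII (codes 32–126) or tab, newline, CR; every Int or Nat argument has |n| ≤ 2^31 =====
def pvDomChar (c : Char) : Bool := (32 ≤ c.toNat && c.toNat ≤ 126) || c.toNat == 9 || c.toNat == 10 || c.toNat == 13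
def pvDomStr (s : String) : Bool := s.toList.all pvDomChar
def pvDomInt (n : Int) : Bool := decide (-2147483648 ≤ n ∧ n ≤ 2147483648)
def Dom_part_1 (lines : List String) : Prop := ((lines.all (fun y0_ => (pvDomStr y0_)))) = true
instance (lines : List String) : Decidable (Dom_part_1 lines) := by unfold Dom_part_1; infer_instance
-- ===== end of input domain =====

-- B replaces A's two-phase build-groups-then-sum with one streaming pass over the lines (simpler; same cost).

-- ===== PORT A =====
-- separate_groups: the loop over lines carrying (group, groups); 'set(line)' is Set.ofList of its chars
def sepStep (st : List (PySem.Set Char) × List (List (PySem.Set Char))) (line : String) :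
    List (PySem.Set Char) × List (List (PySem.Set Char)) :=
  if line = "\n" ∨ line = "" then ([], st.2 ++ [st.1])
  else (st.1 ++ [PySem.Set.ofList line.toList], st.2)

def separate_groups (lines : List String) : List (List (PySem.Set Char)) :=
  let st := lines.foldl sepStep ([], [])
  st.2 ++ [st.1]

-- yes.update(*individual): each element of the set 'individual' is a 1-char string, so this adds
-- each of individual's characters to yes, i.e. Set.update yes individual
def part_1 (lines : List String) : Int :=
  let groups := separate_groups lines
  let yes_counts := groups.foldl
    (fun acc group =>
      acc ++ [(PySem.Set.len (group.foldl (fun yes individual => PySem.Set.update yes individual)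
                PySem.Set.empty) : Int)]) []
  yes_counts.sum

-- ===== PORT B =====
def altStep (st : PySem.Set Char × Int) (line : String) : PySem.Set Char × Int :=
  if line = "\n" ∨ line = "" then (PySem.Set.empty, st.2 + PySem.Set.len st.1)
  else (PySem.Set.update st.1 line.toList, st.2)

def part_1_alt (lines : List String) : Int :=
  let st := lines.foldl altStep (PySem.Set.empty, 0)
  st.2 + PySem.Set.len st.1

-- ===== PRECONDITION & SPEC =====
def Spec_part_1 (lines : List String) (out : Int) : Prop := out = part_1_alt lines
instance (lines : List String) (out : Int) : Decidable (Spec_part_1 lines out) := by unfold Spec_part_1; infer_instance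

-- ===== CLAIM (what is proved, stated in full; the proofs are below) =====
def Claim_equal_part_1 : Prop := ∀ (lines : List String), Dom_part_1 lines → Spec_part_1 lines (part_1 lines)

-- ===== LEMMAS AND PROOFS =====

-- the union-set of one group, as A computes it
def gset (group : List (PySem.Set Char)) : PySem.Set Char :=
  group.foldl (fun yes individual => PySem.Set.update yes individual) PySem.Set.empty

-- A's sum over a list of finished groups
def gsum (groups : List (List (PySem.Set Char))) : Int :=
  (groups.foldl (fun acc group => acc ++ [(PySem.Set.len (gset group) : Int)]) []).sum

lemma gsum_append_singleton (groups : List (List (PySem.Set Char))) (g : List (PySem.Set Char)) :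
    gsum (groups ++ [g]) = gsum groups + PySem.Set.len (gset g) := by
  simp [gsum]

lemma gset_append_singleton (group : List (PySem.Set Char)) (s : PySem.Set Char) :
    gset (group ++ [s]) = PySem.Set.update (gset group) s := by
  simp [gset, List.foldl_append]

-- updating with set(l) is the same list as updating with l (duplicates are no-ops)
lemma update_ofList (s : PySem.Set Char) (l : List Char) :
    PySem.Set.update s (PySem.Set.ofList l) = PySem.Set.update s l := by
  rw [PySem.Set.update_eq_append_filter, PySem.Set.update_eq_append_filter,
      PySem.Set.ofList_eq_self_of_nodup _ (PySem.Set.nodup_ofList l)]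

-- the streaming invariant: running B's fold from (gset group, gsum groups) computes A's answer
lemma stream_inv (lines : List String) (group : List (PySem.Set Char))
    (groups : List (List (PySem.Set Char))) :
    (let st := lines.foldl sepStep (group, groups); gsum (st.2 ++ [st.1]))
    = (let st := lines.foldl altStep (gset group, gsum groups); st.2 + PySem.Set.len st.1) := by
  induction lines generalizing group groups with
  | nil => simpa using gsum_append_singleton groups group
  | cons line rest ih =>
    by_cases h : line = "\n" ∨ line = ""
    · simpa [sepStep, altStep, h, gsum_append_singleton, gset] using
        ih [] (groups ++ [group])
    · simpa [sepStep, altStep, h, gset_append_singleton, update_ofList] using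
        ih (group ++ [PySem.Set.ofList line.toList]) groups

-- ===== VERDICT (by name: the statement is the Claim_ definition above) =====
theorem part_1_spec : Claim_equal_part_1 := by
  intro lines _
  unfold Spec_part_1 part_1 part_1_alt separate_groups
  simpa [gsum, gset] using stream_inv lines [] []
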